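-- pv_equiv track=rewrite | github.com/eliottcassidy2000/math | 04-computation/omega_claw_fast.py | find_claw_in_3cycles
-- ===== SOURCE A (Python) =====
-- from itertools import permutations, combinations
--
-- def find_claw_in_3cycles(cycles_3):
--     """Check if there's a claw among 3-cycles only.
--
--     A claw needs C0, C1, C2, C3 where:
--     - C1, C2, C3 are pairwise vertex-disjoint
--     - Each Ci shares >= 1 vertex with C0
--     """
--     cycle_sets = [set(c) for c in cycles_3]
--     m = len(cycles_3)
--
--     for c0_idx in range(m):
--         c0 = cycle_sets[c0_idx]
--         # Find cycles that touch c0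
--         touching = []
--         for i in range(m):
--             if i != c0_idx and c0 & cycle_sets[i]:
--                 touching.append(i)
--
--         if len(touching) < 3:
--             continue
--
--         # Check if any triple of touching cycles is pairwise disjoint
--         for triple in combinations(touching, 3):
--             i, j, k = triple
--             if (not (cycle_sets[i] & cycle_sets[j]) and
--                 not (cycle_sets[i] & cycle_sets[k]) and
--                 not (cycle_sets[j] & cycle_sets[k])):
--                 return (c0_idx, triple)
--
--     return None
-- ===== SOURCE B (Python) =====
-- def find_claw_in_3cycles(cycles_3):
--     """Inverted index (vertex -> cycle indices) for 'touching', then a pruned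
--     triangle search over disjointness adjacency lists instead of combinations()."""
--     cycle_sets = [set(c) for c in cycles_3]
--     m = len(cycle_sets)
--
--     # inverted index: vertex -> ascending list of cycle indices containing it
--     index = {}
--     for idx in range(m):
--         for v in cycle_sets[idx]:
--             index.setdefault(v, []).append(idx)
--
--     for c0_idx in range(m):
--         seen = set()
--         for v in cycle_sets[c0_idx]:
--             seen.update(index[v])
--         seen.discard(c0_idx)
--         touching = sorted(seen)
--
--         if len(touching) < 3:
--             continue
--
--         # triangle search: adjacency row of a = later touching cycles disjoint from a
--         for p in range(len(touching)):
--             a = touching[p]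
--             row = [b for b in touching[p + 1:] if not (cycle_sets[a] & cycle_sets[b])]
--             for q in range(len(row)):
--                 j = row[q]
--                 ks = [k for k in row[q + 1:] if not (cycle_sets[j] & cycle_sets[k])]
--                 if ks:
--                     return (c0_idx, (a, j, ks[0]))
--
--     return None
-- ===== Notes on version B (the rewrite author's own statement) =====
-- stated objective: alternative
-- what changed: B builds an inverted vertex-to-cycle-indices index once and derives each c0's touching set from it (sorted de-duplicated union) instead of scanning all m cycles per c0, and replaces the combinations(touching,3) scan by a pruned triangle search over per-cycle disjointness adjacency rows.
import Mathlib
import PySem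

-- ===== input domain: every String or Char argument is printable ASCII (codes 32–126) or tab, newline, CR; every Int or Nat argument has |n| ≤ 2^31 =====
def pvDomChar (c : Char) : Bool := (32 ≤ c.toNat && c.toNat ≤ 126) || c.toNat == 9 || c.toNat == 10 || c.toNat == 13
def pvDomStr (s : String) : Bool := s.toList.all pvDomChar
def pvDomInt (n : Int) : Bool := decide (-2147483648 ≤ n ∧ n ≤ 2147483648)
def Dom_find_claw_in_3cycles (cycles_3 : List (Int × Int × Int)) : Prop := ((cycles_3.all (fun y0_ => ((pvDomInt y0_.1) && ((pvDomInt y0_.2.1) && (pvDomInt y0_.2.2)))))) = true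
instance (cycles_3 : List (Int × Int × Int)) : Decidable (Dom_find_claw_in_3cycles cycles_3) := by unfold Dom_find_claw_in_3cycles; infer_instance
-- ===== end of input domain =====

-- B replaces the per-c0 full scan + combinations(touching, 3) by an inverted vertex->cycles index
-- and a pruned triangle search over disjointness adjacency rows (alternative decomposition, same results).


-- ===== PORT A =====
-- cycle_sets = [set(c) for c in cycles_3] — the identical first line of both Pythons
def clawSets (cycles_3 : List (Int × Int × Int)) : List (PySem.Set Int) :=
  cycles_3.map (fun c => PySem.Set.ofList [c.1, c.2.1, c.2.2])

def find_claw_in_3cycles (cycles_3 : List (Int × Int × Int)) : Option (Int × (Int × Int × Int)) :=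
  let cycle_sets := clawSets cycles_3
  let m : Int := cycles_3.length
  (PySem.List.pyRange 0 m 1).findSome? (fun c0_idx =>
    let c0 := PySem.List.pyGetD cycle_sets c0_idx []
    let touching := (PySem.List.pyRange 0 m 1).filter (fun i =>
      decide (i ≠ c0_idx) && !((PySem.Set.inter c0 (PySem.List.pyGetD cycle_sets i [])).isEmpty))
    if touching.length < 3 then none
    else
      (PySem.List.combinations touching 3).findSome? (fun t =>
        match t with
        | [i, j, k] =>
          if (PySem.Set.inter (PySem.List.pyGetD cycle_sets i []) (PySem.List.pyGetD cycle_sets j [])).isEmpty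
              && (PySem.Set.inter (PySem.List.pyGetD cycle_sets i []) (PySem.List.pyGetD cycle_sets k [])).isEmpty
              && (PySem.Set.inter (PySem.List.pyGetD cycle_sets j []) (PySem.List.pyGetD cycle_sets k [])).isEmpty
          then some (c0_idx, (i, j, k)) else none
        | _ => none))

-- ===== PORT B =====
-- not (cycle_sets[a] & cycle_sets[b])
def clawDisj (cycle_sets : List (PySem.Set Int)) (a b : Int) : Bool :=
  (PySem.Set.inter (PySem.List.pyGetD cycle_sets a []) (PySem.List.pyGetD cycle_sets b [])).isEmpty

-- inner loop over one adjacency row: for q, j in row: ks = row[q+1:] disjoint from j; first hit wins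
def clawRow (cycle_sets : List (PySem.Set Int)) : List Int → Option (Int × Int)
  | [] => none
  | j :: rest =>
    match rest.filter (fun k => clawDisj cycle_sets j k) with
    | k :: _ => some (j, k)
    | [] => clawRow cycle_sets rest

-- outer triangle loop: for p, a in touching: row = later touching disjoint from a; search the row
def clawTri (cycle_sets : List (PySem.Set Int)) : List Int → Option (Int × Int × Int)
  | [] => none
  | a :: rest =>
    match clawRow cycle_sets (rest.filter (fun b => clawDisj cycle_sets a b)) with
    | some (j, k) => some (a, j, k)
    | none => clawTri cycle_sets rest

-- index = {}; for idx in range(m): for v in cycle_sets[idx]: index.setdefault(v, []).append(idx)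
def clawIndex (cycle_sets : List (PySem.Set Int)) (m : Int) : PySem.Dict Int (List Int) :=
  (PySem.List.pyRange 0 m 1).foldl (fun d idx =>
    (PySem.List.pyGetD cycle_sets idx []).foldl (fun d v => d.modify v [] (fun l => l ++ [idx])) d)
    PySem.Dict.empty

def find_claw_in_3cycles_alt (cycles_3 : List (Int × Int × Int)) : Option (Int × (Int × Int × Int)) :=
  let cycle_sets := clawSets cycles_3
  let m : Int := cycle_sets.length
  let index := clawIndex cycle_sets m
  (PySem.List.pyRange 0 m 1).findSome? (fun c0_idx =>
    let seen := (PySem.List.pyGetD cycle_sets c0_idx []).foldl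
      (fun s v => PySem.Set.update s (index.getD v [])) PySem.Set.empty
    let touching := PySem.List.sorted (PySem.Set.discard seen c0_idx) (fun x => x)
    if touching.length < 3 then none
    else (clawTri cycle_sets touching).map (fun t => (c0_idx, t)))

-- ===== PRECONDITION & SPEC =====
def Spec_find_claw_in_3cycles (cycles_3 : List (Int × Int × Int)) (out : Option (Int × (Int × Int × Int))) : Prop := out = find_claw_in_3cycles_alt cycles_3
instance (cycles_3 : List (Int × Int × Int)) (out : Option (Int × (Int × Int × Int))) : Decidable (Spec_find_claw_in_3cycles cycles_3 out) := by unfold Spec_find_claw_in_3cycles; infer_instance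

-- ===== CLAIM (what is proved, stated in full; the proofs are below) =====
def Claim_equal_find_claw_in_3cycles : Prop := ∀ (cycles_3 : List (Int × Int × Int)), Dom_find_claw_in_3cycles cycles_3 → Spec_find_claw_in_3cycles cycles_3 (find_claw_in_3cycles cycles_3)

-- ===== LEMMAS AND PROOFS =====

-- named forms of A's two inner loop bodies (per head element a, resp. per triple), used in the lemmas
def clawPairF (cs : List (PySem.Set Int)) (a : Int) : List Int → Option (Int × Int)
  | [j, k] => if clawDisj cs a j && clawDisj cs a k && clawDisj cs j k then some (j, k) else none
  | _ => none
def clawTriF (cs : List (PySem.Set Int)) : List Int → Option (Int × Int × Int)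
  | [i, j, k] => if clawDisj cs i j && clawDisj cs i k && clawDisj cs j k then some (i, j, k) else none
  | _ => none

theorem claw_findSome?_congr {α β : Type} (l : List α) (f g : α → Option β)
    (h : ∀ x ∈ l, f x = g x) : l.findSome? f = l.findSome? g := by
  induction l with
  | nil => rfl
  | cons x xs ih =>
    simp only [List.findSome?_cons, h x (by simp)]
    cases g x with
    | none => exact ih (fun y hy => h y (by simp [hy]))
    | some b => rfl

theorem claw_findSome?_map_opt {α β γ : Type} (l : List α) (g : α → Option β) (h : β → γ) :
    l.findSome? (fun t => (g t).map h) = (l.findSome? g).map h := by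
  induction l with
  | nil => rfl
  | cons x xs ih =>
    simp only [List.findSome?_cons]
    cases g x with
    | none => simpa using ih
    | some b => rfl

theorem claw_findSome?_if_head {α β : Type} (xs : List α) (p : α → Bool) (f : α → β) :
    xs.findSome? (fun k => if p k then some (f k) else none)
      = ((xs.filter p).head?).map f := by
  induction xs with
  | nil => rfl
  | cons x xs ih => by_cases hx : p x <;> simp [hx, ih]

-- B's row search is the first good pair of A's combinations(rest, 2) scan
theorem claw_row_eq (cs : List (PySem.Set Int)) (a : Int) : ∀ (rest : List Int),
    (PySem.List.combinations rest 2).findSome? (clawPairF cs a)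
      = clawRow cs (rest.filter (fun b => clawDisj cs a b)) := by
  have hrowcons : ∀ (j : Int) (rest : List Int), clawRow cs (j :: rest)
      = (match rest.filter (fun k => clawDisj cs j k) with
         | k :: _ => some (j, k)
         | [] => clawRow cs rest) := fun _ _ => rfl
  intro rest
  induction rest with
  | nil => rfl
  | cons x xs ih =>
    rw [show (2 : Nat) = 1 + 1 from rfl, PySem.List.combinations_cons_succ,
      List.findSome?_append, List.findSome?_map, PySem.List.combinations_one, List.findSome?_map]
    rw [show (1 + 1 : Nat) = 2 from rfl] at *
    have hhead : ((clawPairF cs a ∘ fun c => x :: c) ∘ fun y => [y])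
        = fun k => if clawDisj cs a x && (clawDisj cs a k && clawDisj cs x k) then some ((x, k) : Int × Int) else none := by
      funext k
      simp [Function.comp, clawPairF, Bool.and_assoc]
    rw [hhead, List.filter_cons]
    by_cases hx : clawDisj cs a x
    · rw [if_pos hx]
      simp only [hx, Bool.true_and]
      rw [claw_findSome?_if_head xs (fun k => clawDisj cs a k && clawDisj cs x k) (fun k => ((x, k) : Int × Int))]
      have hff : xs.filter (fun k => clawDisj cs a k && clawDisj cs x k)
          = (xs.filter (fun k => clawDisj cs a k)).filter (fun k => clawDisj cs x k) := by
        rw [List.filter_filter]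
        congr 1
        funext k
        rw [Bool.and_comm]
      rw [hff]
      cases hc : (xs.filter (fun k => clawDisj cs a k)).filter (fun k => clawDisj cs x k) with
      | nil =>
        simp only [List.head?_nil, Option.map_none, Option.none_or]
        rw [ih, hrowcons, hc]
      | cons k ks =>
        simp only [List.head?_cons, Option.map_some, Option.some_or]
        rw [hrowcons, hc]
    · rw [if_neg (by simp [hx])]
      simp only [hx, Bool.false_and]
      have : xs.findSome? (fun k => if false = true then some ((x, k) : Int × Int) else none) = none := by
        rw [List.findSome?_eq_none_iff]
        intro y _
        simp
      rw [this, Option.none_or, ih]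

-- B's triangle search is the first good triple of A's combinations(touching, 3) scan
theorem claw_tri_eq (cs : List (PySem.Set Int)) : ∀ (ts : List Int),
    (PySem.List.combinations ts 3).findSome? (clawTriF cs) = clawTri cs ts := by
  have htricons : ∀ (a : Int) (rest : List Int), clawTri cs (a :: rest)
      = (match clawRow cs (rest.filter (fun b => clawDisj cs a b)) with
         | some (j, k) => some (a, j, k)
         | none => clawTri cs rest) := fun _ _ => rfl
  intro ts
  induction ts with
  | nil => rfl
  | cons a rest ih =>
    rw [show (3 : Nat) = 2 + 1 from rfl, PySem.List.combinations_cons_succ, List.findSome?_append,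
      List.findSome?_map]
    rw [show (2 + 1 : Nat) = 3 from rfl] at *
    have hhead : (clawTriF cs ∘ fun c => a :: c)
        = fun t => (clawPairF cs a t).map (fun p : Int × Int => ((a, p.1, p.2) : Int × Int × Int)) := by
      funext t
      match t with
      | [] => rfl
      | [_] => rfl
      | [j, k] =>
        simp only [Function.comp, clawTriF, clawPairF]
        by_cases h : clawDisj cs a j && clawDisj cs a k && clawDisj cs j k <;> simp [h]
      | _ :: _ :: _ :: _ => rfl
    rw [hhead, claw_findSome?_map_opt, claw_row_eq, htricons]
    cases hc : clawRow cs (rest.filter (fun b => clawDisj cs a b)) with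
    | none => simpa [hc] using ih
    | some p => obtain ⟨j, k⟩ := p; rfl

-- membership in one vertex's row after one cycle's inner index loop
theorem claw_index_mem (idx w i : Int) (vs : List Int) (d : PySem.Dict Int (List Int)) :
    i ∈ (vs.foldl (fun d v => d.modify v [] (fun l => l ++ [idx])) d).getD w []
      ↔ i ∈ d.getD w [] ∨ (i = idx ∧ w ∈ vs) := by
  have h : vs.foldl (fun d v => d.modify v [] (fun l => l ++ [idx])) d
      = (vs.map (fun v => (v, idx))).foldl (fun d p => d.modify p.1 [] (fun l => l ++ [p.2])) d := by
    rw [List.foldl_map]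
  rw [h, PySem.Dict.getD_foldl_modify_append]
  simp only [List.mem_append, List.mem_map, List.mem_filter]
  constructor
  · rintro (h | ⟨p, ⟨⟨v, hv, rfl⟩, hbeq⟩, hpi⟩)
    · exact Or.inl h
    · simp only [beq_iff_eq] at hbeq
      exact Or.inr ⟨hpi.symm, hbeq ▸ hv⟩
  · rintro (h | ⟨rfl, hw⟩)
    · exact Or.inl h
    · exact Or.inr ⟨(w, i), ⟨⟨w, hw, rfl⟩, by simp⟩, rfl⟩

-- membership in one vertex's row of the whole inverted index
theorem claw_index_mem_all (cs : List (PySem.Set Int)) (w i : Int) :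
    ∀ (L : List Int) (d : PySem.Dict Int (List Int)),
    i ∈ (L.foldl (fun d idx =>
          (PySem.List.pyGetD cs idx []).foldl (fun d v => d.modify v [] (fun l => l ++ [idx])) d) d).getD w []
      ↔ i ∈ d.getD w [] ∨ (i ∈ L ∧ w ∈ PySem.List.pyGetD cs i []) := by
  intro L
  induction L with
  | nil => simp
  | cons x xs ih =>
    intro d
    rw [List.foldl_cons, ih, claw_index_mem]
    constructor
    · rintro ((h | ⟨rfl, hw⟩) | ⟨hx, hw⟩)
      · exact Or.inl h
      · exact Or.inr ⟨by simp, hw⟩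
      · exact Or.inr ⟨by simp [hx], hw⟩
    · rintro (h | ⟨hx, hw⟩)
      · exact Or.inl (Or.inl h)
      · rcases List.mem_cons.mp hx with rfl | hx
        · exact Or.inl (Or.inr ⟨rfl, hw⟩)
        · exact Or.inr ⟨hx, hw⟩

theorem claw_seen_mem (g : Int → List Int) (y : Int) : ∀ (vs : List Int) (s : PySem.Set Int),
    y ∈ vs.foldl (fun s v => PySem.Set.update s (g v)) s ↔ y ∈ s ∨ ∃ v ∈ vs, y ∈ g v := by
  intro vs
  induction vs with
  | nil => simp
  | cons x xs ih =>
    intro s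
    simp only [List.foldl_cons, ih, PySem.Set.mem_update]
    constructor
    · rintro ((h | h) | ⟨v, hv, hy⟩)
      · exact Or.inl h
      · exact Or.inr ⟨x, by simp, h⟩
      · exact Or.inr ⟨v, by simp [hv], hy⟩
    · rintro (h | ⟨v, hv, hy⟩)
      · exact Or.inl (Or.inl h)
      · rcases List.mem_cons.mp hv with rfl | hv
        · exact Or.inl (Or.inr hy)
        · exact Or.inr ⟨v, hv, hy⟩

theorem claw_seen_nodup (g : Int → List Int) : ∀ (vs : List Int) (s : PySem.Set Int),
    s.Nodup → (vs.foldl (fun s v => PySem.Set.update s (g v)) s).Nodup := by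
  intro vs
  induction vs with
  | nil => exact fun s h => h
  | cons x xs ih => exact fun s h => ih _ (PySem.Set.nodup_update _ _ h)

-- B's sorted de-duplicated union over the inverted index is exactly A's touching list
theorem claw_touching_eq (cycles_3 : List (Int × Int × Int)) (c0_idx : Int) :
    PySem.List.sorted
      (PySem.Set.discard
        ((PySem.List.pyGetD (clawSets cycles_3) c0_idx []).foldl
          (fun s v => PySem.Set.update s
            ((clawIndex (clawSets cycles_3) (cycles_3.length)).getD v []))
          PySem.Set.empty)
        c0_idx)
      (fun x => x)
      = (PySem.List.pyRange 0 (cycles_3.length) 1).filter (fun i =>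
          decide (i ≠ c0_idx) &&
          !((PySem.Set.inter (PySem.List.pyGetD (clawSets cycles_3) c0_idx [])
              (PySem.List.pyGetD (clawSets cycles_3) i [])).isEmpty)) := by
  apply PySem.List.sorted_eq_of_perm_of_pairwise_lt
  · refine (List.perm_ext_iff_of_nodup
      ((PySem.List.nodup_pyRange_one 0 _).filter _)
      (PySem.Set.nodup_discard _ _ (claw_seen_nodup _ _ _ (by exact List.nodup_nil)))).mpr ?_
    intro a
    rw [List.mem_filter, PySem.Set.mem_discard, claw_seen_mem]
    unfold clawIndex
    constructor
    · rintro ⟨hr, hp⟩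
      simp only [Bool.and_eq_true, decide_eq_true_eq, Bool.not_eq_true'] at hp
      obtain ⟨hne, hie⟩ := hp
      rcases List.exists_mem_of_ne_nil _ (by simpa [List.isEmpty_eq_false_iff] using hie) with ⟨y, hy⟩
      rw [PySem.Set.mem_inter] at hy
      refine ⟨Or.inr ⟨y, hy.1, ?_⟩, hne⟩
      rw [claw_index_mem_all]
      exact Or.inr ⟨hr, hy.2⟩
    · rintro ⟨h | ⟨v, hv, hvrow⟩, hne⟩
      · simp at h
      · rw [claw_index_mem_all] at hvrow
        rcases hvrow with h | ⟨hr, hw⟩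
        · simp at h
        · refine ⟨hr, ?_⟩
          simp only [Bool.and_eq_true, decide_eq_true_eq, Bool.not_eq_true']
          refine ⟨hne, ?_⟩
          rw [List.isEmpty_eq_false_iff]
          intro hnil
          have : v ∈ PySem.Set.inter (PySem.List.pyGetD (clawSets cycles_3) c0_idx [])
              (PySem.List.pyGetD (clawSets cycles_3) a []) := by
            rw [PySem.Set.mem_inter]
            exact ⟨hv, hw⟩
          simp [hnil] at this
  · exact (PySem.List.pairwise_lt_pyRange_one 0 _).filter _

-- ===== VERDICT (by name: the statement is the Claim_ definition above) =====
theorem find_claw_in_3cycles_spec : Claim_equal_find_claw_in_3cycles := by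
  intro cycles_3 _
  unfold Spec_find_claw_in_3cycles find_claw_in_3cycles find_claw_in_3cycles_alt
  dsimp only
  have hlen : (((clawSets cycles_3).length : Int)) = ((cycles_3.length : Int)) := by
    simp [clawSets]
  rw [hlen]
  apply claw_findSome?_congr
  intro c0_idx _
  rw [claw_touching_eq]
  by_cases hT : ((PySem.List.pyRange 0 (cycles_3.length) 1).filter (fun i =>
      decide (i ≠ c0_idx) &&
      !((PySem.Set.inter (PySem.List.pyGetD (clawSets cycles_3) c0_idx [])
          (PySem.List.pyGetD (clawSets cycles_3) i [])).isEmpty))).length < 3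
  · rw [if_pos hT, if_pos hT]
  · rw [if_neg hT, if_neg hT, ← claw_tri_eq, ← claw_findSome?_map_opt]
    apply claw_findSome?_congr
    intro t _
    rcases t with _ | ⟨i, _ | ⟨j, _ | ⟨k, _ | t⟩⟩⟩
    · rfl
    · rfl
    · rfl
    · simp only [clawTriF, clawDisj]
      by_cases h : (PySem.Set.inter (PySem.List.pyGetD (clawSets cycles_3) i []) (PySem.List.pyGetD (clawSets cycles_3) j [])).isEmpty
          && (PySem.Set.inter (PySem.List.pyGetD (clawSets cycles_3) i []) (PySem.List.pyGetD (clawSets cycles_3) k [])).isEmpty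
          && (PySem.Set.inter (PySem.List.pyGetD (clawSets cycles_3) j []) (PySem.List.pyGetD (clawSets cycles_3) k [])).isEmpty
      · rw [if_pos h, if_pos h]
        rfl
      · rw [if_neg h, if_neg h]
        rfl
    · rfl
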